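-- pv_equiv track=rewrite | github.com/kgold/tweetrate | tweetsentiment.py | countSents
-- ===== SOURCE A (Python) =====
-- def sentToNumber(sentClass):
--     if sentClass == 'pos':
--         return 2
--     if sentClass == 'neg':
--         return 0
--     return 1
--
-- def countSents(valueArray):
--     pCounts  = [0]
--     nCounts = [0]
--     neuCounts = [0]
--     for i in range(len(valueArray)):
--         if valueArray[i] == sentToNumber('pos'):
--             pCounts.append(pCounts[i] + 1)
--             nCounts.append(nCounts[i])
--             neuCounts.append(neuCounts[i])
--         elif valueArray[i] == sentToNumber('neg'):
--             pCounts.append(pCounts[i])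
--             nCounts.append(nCounts[i] + 1)
--             neuCounts.append(neuCounts[i])
--         else:
--             pCounts.append(pCounts[i])
--             nCounts.append(nCounts[i])
--             neuCounts.append(neuCounts[i] + 1)
--     return pCounts, nCounts, neuCounts
-- ===== SOURCE B (Python) =====
-- def _accumulate(xs):
--     out = [0]
--     total = 0
--     for x in xs:
--         total += x
--         out.append(total)
--     return out
--
-- def countSents(valueArray):
--     pos = [1 if v == 2 else 0 for v in valueArray]
--     neg = [1 if v == 0 else 0 for v in valueArray]
--     neu = [1 if v not in (0, 2) else 0 for v in valueArray]
--     return _accumulate(pos), _accumulate(neg), _accumulate(neu)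
-- ===== Notes on version B (the rewrite author's own statement) =====
-- stated objective: simpler
-- what changed: Replaces the single interleaved indexed loop that appends to three self-referencing lists with a two-stage decomposition: map each value to three 0/1 indicator lists, then take running sums of each with one generic prefix-sum helper.
import Mathlib
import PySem

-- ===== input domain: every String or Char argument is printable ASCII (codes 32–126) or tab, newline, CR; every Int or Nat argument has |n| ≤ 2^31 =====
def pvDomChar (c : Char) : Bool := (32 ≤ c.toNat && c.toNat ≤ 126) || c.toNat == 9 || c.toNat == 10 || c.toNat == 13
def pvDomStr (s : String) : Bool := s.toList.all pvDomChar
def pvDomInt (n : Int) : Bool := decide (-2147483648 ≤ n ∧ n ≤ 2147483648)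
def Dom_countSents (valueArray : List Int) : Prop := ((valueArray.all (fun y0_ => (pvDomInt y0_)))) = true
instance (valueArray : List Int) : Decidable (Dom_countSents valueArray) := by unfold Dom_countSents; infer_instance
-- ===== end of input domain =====

-- B replaces A's interleaved self-indexing triple loop by three indicator maps followed by a
-- generic prefix-sum pass (objective: simpler decomposition; same O(n) cost).

-- ===== PORT A =====
def sentToNumber (sentClass : String) : Int :=
  if sentClass = "pos" then 2
  else if sentClass = "neg" then 0
  else 1

def countSents (valueArray : List Int) : List Int × List Int × List Int :=
  (PySem.List.pyRange 0 (valueArray.length : Int) 1).foldl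
    (fun s i =>
      let p := s.1
      let q := s.2.1
      let u := s.2.2
      if PySem.List.pyGetD valueArray i 0 = sentToNumber "pos" then
        (p ++ [PySem.List.pyGetD p i 0 + 1], q ++ [PySem.List.pyGetD q i 0],
         u ++ [PySem.List.pyGetD u i 0])
      else if PySem.List.pyGetD valueArray i 0 = sentToNumber "neg" then
        (p ++ [PySem.List.pyGetD p i 0], q ++ [PySem.List.pyGetD q i 0 + 1],
         u ++ [PySem.List.pyGetD u i 0])
      else
        (p ++ [PySem.List.pyGetD p i 0], q ++ [PySem.List.pyGetD q i 0],
         u ++ [PySem.List.pyGetD u i 0 + 1]))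
    ([0], [0], [0])

-- ===== PORT B =====
-- port of Source B's _accumulate: running sums with initial 0
def pvAccumulate (xs : List Int) : List Int :=
  (xs.foldl (fun (s : List Int × Int) x => (s.1 ++ [s.2 + x], s.2 + x)) ([0], 0)).1

def countSents_alt (valueArray : List Int) : List Int × List Int × List Int :=
  let pos := valueArray.map (fun v => if v = 2 then (1 : Int) else 0)
  let neg := valueArray.map (fun v => if v = 0 then (1 : Int) else 0)
  let neu := valueArray.map (fun v => if ¬ (v = 0 ∨ v = 2) then (1 : Int) else 0)
  (pvAccumulate pos, pvAccumulate neg, pvAccumulate neu)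

-- ===== PRECONDITION & SPEC =====
def Spec_countSents (valueArray : List Int) (out : List Int × List Int × List Int) : Prop := out = countSents_alt valueArray
instance (valueArray : List Int) (out : List Int × List Int × List Int) : Decidable (Spec_countSents valueArray out) := by unfold Spec_countSents; infer_instance

-- ===== CLAIM (what is proved, stated in full; the proofs are below) =====
def Claim_equal_countSents : Prop := ∀ (valueArray : List Int), Dom_countSents valueArray → Spec_countSents valueArray (countSents valueArray)

-- ===== LEMMAS AND PROOFS =====

/-- proof-side recursive characterization of the running sums past the initial 0 -/
def accFrom (t : Int) : List Int → List Int
  | [] => []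
  | x :: xs => (t + x) :: accFrom (t + x) xs

lemma foldl_accum_pair (xs : List Int) : ∀ (L : List Int) (t : Int),
    xs.foldl (fun (s : List Int × Int) x => (s.1 ++ [s.2 + x], s.2 + x)) (L, t)
      = (L ++ accFrom t xs, t + xs.sum) := by
  induction xs with
  | nil => intro L t; simp [accFrom]
  | cons x xs ih =>
      intro L t
      simp only [List.foldl_cons, ih, accFrom, List.sum_cons, Prod.mk.injEq]
      exact ⟨by simp, by omega⟩

lemma pvAccumulate_eq (xs : List Int) : pvAccumulate xs = 0 :: accFrom 0 xs := by
  simp [pvAccumulate, foldl_accum_pair]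

lemma accFrom_append (L : List Int) : ∀ (t x : Int),
    accFrom t (L ++ [x]) = accFrom t L ++ [t + L.sum + x] := by
  induction L with
  | nil => intro t x; simp [accFrom]
  | cons y L ih =>
      intro t x
      simp only [List.cons_append, accFrom, ih, List.sum_cons]
      congr 2
      ring_nf

lemma getD_acc (L : List Int) : ∀ t, (t :: accFrom t L).getD L.length 0 = t + L.sum := by
  induction L with
  | nil => intro t; simp [accFrom]
  | cons y L ih =>
      intro t
      simpa [accFrom, List.sum_cons, add_assoc] using ih (t + y)

lemma getD_accum (L : List Int) : PySem.List.pyGetD (pvAccumulate L) (L.length : Int) 0 = L.sum := by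
  rw [pvAccumulate_eq]
  simpa using getD_acc L 0

lemma countSents_loop (xs : List Int) : ∀ (n : ℕ), n ≤ xs.length →
    (PySem.List.pyRange 0 (n : Int) 1).foldl
      (fun s i =>
        let p := s.1
        let q := s.2.1
        let u := s.2.2
        if PySem.List.pyGetD xs i 0 = sentToNumber "pos" then
          (p ++ [PySem.List.pyGetD p i 0 + 1], q ++ [PySem.List.pyGetD q i 0],
           u ++ [PySem.List.pyGetD u i 0])
        else if PySem.List.pyGetD xs i 0 = sentToNumber "neg" then
          (p ++ [PySem.List.pyGetD p i 0], q ++ [PySem.List.pyGetD q i 0 + 1],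
           u ++ [PySem.List.pyGetD u i 0])
        else
          (p ++ [PySem.List.pyGetD p i 0], q ++ [PySem.List.pyGetD q i 0],
           u ++ [PySem.List.pyGetD u i 0 + 1]))
      ([0], [0], [0])
    = (pvAccumulate ((xs.take n).map (fun v => if v = 2 then (1 : Int) else 0)),
       pvAccumulate ((xs.take n).map (fun v => if v = 0 then (1 : Int) else 0)),
       pvAccumulate ((xs.take n).map (fun v => if ¬ (v = 0 ∨ v = 2) then (1 : Int) else 0))) := by
  intro n
  induction n with
  | zero =>
      intro _
      simp [PySem.List.pyRange_one_eq_nil, pvAccumulate]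
  | succ n ih =>
      intro hn
      have hlt : n < xs.length := by omega
      have hcast : ((n + 1 : ℕ) : Int) = (n : Int) + 1 := by push_cast; ring
      rw [hcast, PySem.List.pyRange_one_succ_right (by positivity), List.foldl_append,
          ih (by omega)]
      have hget : PySem.List.pyGetD xs (n : Int) 0 = xs[n] := by
        rw [PySem.List.pyGetD_natCast, List.getD_eq_getElem _ _ hlt]
      have htake : xs.take (n + 1) = xs.take n ++ [xs[n]] := by
        rw [List.take_add_one, List.getElem?_eq_getElem hlt]; rfl
      have hlen2 : ((xs.take n).map (fun v => if v = 2 then (1 : Int) else 0)).length = n := by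
        simp [List.length_take, Nat.min_eq_left (le_of_lt hlt)]
      have hlen0 : ((xs.take n).map (fun v => if v = 0 then (1 : Int) else 0)).length = n := by
        simp [List.length_take, Nat.min_eq_left (le_of_lt hlt)]
      have hlenN : ((xs.take n).map (fun v => if ¬ (v = 0 ∨ v = 2) then (1 : Int) else 0)).length = n := by
        simp [List.length_take, Nat.min_eq_left (le_of_lt hlt)]
      have g2 := getD_accum ((xs.take n).map (fun v => if v = 2 then (1 : Int) else 0))
      have g0 := getD_accum ((xs.take n).map (fun v => if v = 0 then (1 : Int) else 0))
      have gN := getD_accum ((xs.take n).map (fun v => if ¬ (v = 0 ∨ v = 2) then (1 : Int) else 0))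
      rw [hlen2] at g2; rw [hlen0] at g0; rw [hlenN] at gN
      simp at g2 g0 gN
      simp only [List.foldl_cons, List.foldl_nil, hget, htake, List.map_append, List.map_cons,
        List.map_nil, sentToNumber]
      rw [pvAccumulate_eq, pvAccumulate_eq, pvAccumulate_eq,
          pvAccumulate_eq, pvAccumulate_eq, pvAccumulate_eq] at *
      rw [accFrom_append, accFrom_append, accFrom_append]
      by_cases h2 : xs[n] = 2
      · simp [h2, g2, g0, gN]
      · by_cases h0 : xs[n] = 0
        · simp [h0, g2, g0, gN]
        · simp [h2, h0, g2, g0, gN]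

-- ===== VERDICT (by name: the statement is the Claim_ definition above) =====
theorem countSents_spec : Claim_equal_countSents := by
  intro xs _
  show countSents xs = countSents_alt xs
  unfold countSents countSents_alt
  simpa using countSents_loop xs xs.length (le_refl _)
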